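-- pv_equiv track=rewrite | github.com/daniel-reich/ubiquitous-fiesta | 68omQmgQEwv8558ZK_6.py | max_stats
-- ===== SOURCE A (Python) =====
-- def max_stats(character, gold):
--     characters = {
--         'Knight' : [120, 140, 6],
--         'Warrior' : [180, 71, 8],
--         'Fairy' : [71, 100, 16],
--         'Robot' : [160, 120, 11],
--         'Giant' : [160, 200, 4]
--     }
--     weapons = {
--         'Simple Sword': [10, 20],
--         'Katana': [20, 40],
--         'Sharpened Sword': [30, 60],
--         'Great Sword': [40, 80],
--         'Forgotten Sword': [50, 100]
--     }
--     armor = {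
--         'Bronze Armor': [20, 30],
--         'Iron Armor': [40, 60],
--         'Steel Armor': [60, 90],
--         'Obsidian Armor': [80, 120],
--         'Dragonhide Armor': [100, 150]
--     }
--     boots = {
--         'Simple Boots': [3, 24],
--         'Leather Boots': [6, 48],
--         'Strong Boots': [9, 72],
--         'Compound Boots': [12, 96],
--         'Soft Boots': [15, 120]
--     }
--     add_attack =  [i[0] for i in weapons.values() if i[1]==max([i[1] for i in weapons.values() if i[1] <= gold])]
--     add_defense = [i[0] for i in armor.values() if i[1]==max([i[1] for i in armor.values() if i[1] <= gold])]
--     add_speed = [i[0] for i in boots.values() if i[1]==max([i[1] for i in boots.values() if i[1] <= gold])]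
--     return [
--     characters[character][0] + add_attack[0],
--     characters[character][1] + add_defense[0],
--     characters[character][2] + add_speed[0]
--     ]
-- ===== SOURCE B (Python) =====
-- def max_stats(character, gold):
--     # Each gear table is an arithmetic progression: weapon k costs 20k and adds 10k attack,
--     # armor k costs 30k and adds 20k defense, boots k cost 24k and add 3k speed (k = 1..5).
--     # So the best affordable tier is min(gold // price_step, 5), a closed form.
--     characters = {
--         'Knight': [120, 140, 6],
--         'Warrior': [180, 71, 8],
--         'Fairy': [71, 100, 16],
--         'Robot': [160, 120, 11],
--         'Giant': [160, 200, 4],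
--     }
--     base = characters[character]
--     return [
--         base[0] + 10 * min(gold // 20, 5),
--         base[1] + 20 * min(gold // 30, 5),
--         base[2] + 3 * min(gold // 24, 5),
--     ]
-- ===== Notes on version B (the rewrite author's own statement) =====
-- stated objective: simpler
-- what changed: Each gear table is an arithmetic progression (tier k costs step*k and adds bonus*k), so B replaces A's per-category max-comprehension plus equality-filter scans with the closed-form bonus*min(gold // step, 5) added to the character's base stats.
import Mathlib
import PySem

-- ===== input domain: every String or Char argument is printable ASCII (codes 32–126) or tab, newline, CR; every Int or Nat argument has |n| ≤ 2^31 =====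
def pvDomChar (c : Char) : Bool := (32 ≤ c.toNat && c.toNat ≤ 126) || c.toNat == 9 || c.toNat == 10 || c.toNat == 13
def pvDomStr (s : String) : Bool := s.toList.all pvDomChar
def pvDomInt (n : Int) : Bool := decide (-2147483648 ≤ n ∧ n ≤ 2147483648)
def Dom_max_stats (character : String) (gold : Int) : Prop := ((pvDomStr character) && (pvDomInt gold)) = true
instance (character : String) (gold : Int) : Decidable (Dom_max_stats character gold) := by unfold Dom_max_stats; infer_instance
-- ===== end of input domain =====

-- B replaces A's two-pass max-comprehension-plus-filter per gear table with a closed-form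
-- best-affordable-tier formula (each table is an arithmetic progression); objective: simpler.

-- ===== PORT A =====
-- Python's fixed two-element gear values [stat, cost] are rendered as pairs (stat, cost).
-- The repeated comprehension pattern 'max of affordable costs, then first item with that cost'
-- is the helper pvBestA (A repeats it verbatim for weapons/armor/boots).
def pvBestA (vals : List (Int × Int)) (gold : Int) : Option Int :=
  match PySem.List.max? ((vals.filter (fun i => decide (i.2 ≤ gold))).map Prod.snd) (fun y => y) with
  | none => none   -- Python: max([]) raises ValueError (excluded by Pre_)
  | some m => ((vals.filter (fun i => decide (i.2 = m))).map Prod.fst).head?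

def pvCharactersTable : PySem.Dict String (List Int) :=
  PySem.Dict.ofList [("Knight", [120, 140, 6]), ("Warrior", [180, 71, 8]),
    ("Fairy", [71, 100, 16]), ("Robot", [160, 120, 11]), ("Giant", [160, 200, 4])]

def max_stats (character : String) (gold : Int) : List Int :=
  let weapons : List (Int × Int) := [(10, 20), (20, 40), (30, 60), (40, 80), (50, 100)]
  let armor : List (Int × Int) := [(20, 30), (40, 60), (60, 90), (80, 120), (100, 150)]
  let boots : List (Int × Int) := [(3, 24), (6, 48), (9, 72), (12, 96), (15, 120)]
  match pvCharactersTable.get? character, pvBestA weapons gold, pvBestA armor gold, pvBestA boots gold with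
  | some base, some addAttack, some addDefense, some addSpeed =>
      [PySem.List.pyGetD base 0 0 + addAttack,
       PySem.List.pyGetD base 1 0 + addDefense,
       PySem.List.pyGetD base 2 0 + addSpeed]
  | _, _, _, _ => []   -- Python raises KeyError/ValueError here; excluded by Pre_

-- ===== PORT B =====
def max_stats_alt (character : String) (gold : Int) : List Int :=
  match pvCharactersTable.get? character with
  | none => []   -- Python: KeyError (excluded by Pre_)
  | some base =>
      [PySem.List.pyGetD base 0 0 + 10 * min (PySem.Int.floordiv gold 20) 5,
       PySem.List.pyGetD base 1 0 + 20 * min (PySem.Int.floordiv gold 30) 5,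
       PySem.List.pyGetD base 2 0 + 3 * min (PySem.Int.floordiv gold 24) 5]

-- ===== PRECONDITION & SPEC =====
-- Pre_ is exactly where A returns: the character must be one of the five table keys
-- (else KeyError) and gold ≥ 30 so every gear table has an affordable item (else max([])
-- raises ValueError; the cheapest armor costs 30).
def Pre_max_stats (character : String) (gold : Int) : Prop :=
  (character = "Knight" ∨ character = "Warrior" ∨ character = "Fairy" ∨
   character = "Robot" ∨ character = "Giant") ∧ 30 ≤ gold
instance (character : String) (gold : Int) : Decidable (Pre_max_stats character gold) := by
  unfold Pre_max_stats; infer_instance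

def pvWitness_max_stats : String × Int := ("Knight", 100)

def Spec_max_stats (character : String) (gold : Int) (out : List Int) : Prop := out = max_stats_alt character gold
instance (character : String) (gold : Int) (out : List Int) : Decidable (Spec_max_stats character gold out) := by unfold Spec_max_stats; infer_instance

-- ===== CLAIM (what is proved, stated in full; the proofs are below) =====
def Claim_equal_max_stats : Prop := ∀ (character : String) (gold : Int), Dom_max_stats character gold → Pre_max_stats character gold → Spec_max_stats character gold (max_stats character gold)

-- ===== LEMMAS AND PROOFS =====

lemma pvBestA_weapons (gold : Int) (h : (30:Int) ≤ gold) :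
    pvBestA [(10, 20), (20, 40), (30, 60), (40, 80), (50, 100)] gold = some (10 * min (PySem.Int.floordiv gold 20) 5) := by
  rw [PySem.Int.floordiv_eq_ediv_of_pos (by norm_num)]
  rcases lt_or_ge gold 40 with h1 | h1
  · simp [pvBestA, List.filter, PySem.List.max?,
      show (20 : Int) ≤ gold from by omega,
      show ¬((40 : Int) ≤ gold) from by omega,
      show ¬((60 : Int) ≤ gold) from by omega,
      show ¬((80 : Int) ≤ gold) from by omega,
      show ¬((100 : Int) ≤ gold) from by omega]
    omega
  rcases lt_or_ge gold 60 with h2 | h2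
  · simp [pvBestA, List.filter, PySem.List.max?,
      show (20 : Int) ≤ gold from by omega,
      show (40 : Int) ≤ gold from by omega,
      show ¬((60 : Int) ≤ gold) from by omega,
      show ¬((80 : Int) ≤ gold) from by omega,
      show ¬((100 : Int) ≤ gold) from by omega]
    omega
  rcases lt_or_ge gold 80 with h3 | h3
  · simp [pvBestA, List.filter, PySem.List.max?,
      show (20 : Int) ≤ gold from by omega,
      show (40 : Int) ≤ gold from by omega,
      show (60 : Int) ≤ gold from by omega,
      show ¬((80 : Int) ≤ gold) from by omega,
      show ¬((100 : Int) ≤ gold) from by omega]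
    omega
  rcases lt_or_ge gold 100 with h4 | h4
  · simp [pvBestA, List.filter, PySem.List.max?,
      show (20 : Int) ≤ gold from by omega,
      show (40 : Int) ≤ gold from by omega,
      show (60 : Int) ≤ gold from by omega,
      show (80 : Int) ≤ gold from by omega,
      show ¬((100 : Int) ≤ gold) from by omega]
    omega
  simp [pvBestA, List.filter, PySem.List.max?,
      show (20 : Int) ≤ gold from by omega,
      show (40 : Int) ≤ gold from by omega,
      show (60 : Int) ≤ gold from by omega,
      show (80 : Int) ≤ gold from by omega,
      show (100 : Int) ≤ gold from by omega]
  omega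

lemma pvBestA_armor (gold : Int) (h : (30:Int) ≤ gold) :
    pvBestA [(20, 30), (40, 60), (60, 90), (80, 120), (100, 150)] gold = some (20 * min (PySem.Int.floordiv gold 30) 5) := by
  rw [PySem.Int.floordiv_eq_ediv_of_pos (by norm_num)]
  rcases lt_or_ge gold 60 with h1 | h1
  · simp [pvBestA, List.filter, PySem.List.max?,
      show (30 : Int) ≤ gold from by omega,
      show ¬((60 : Int) ≤ gold) from by omega,
      show ¬((90 : Int) ≤ gold) from by omega,
      show ¬((120 : Int) ≤ gold) from by omega,
      show ¬((150 : Int) ≤ gold) from by omega]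
    omega
  rcases lt_or_ge gold 90 with h2 | h2
  · simp [pvBestA, List.filter, PySem.List.max?,
      show (30 : Int) ≤ gold from by omega,
      show (60 : Int) ≤ gold from by omega,
      show ¬((90 : Int) ≤ gold) from by omega,
      show ¬((120 : Int) ≤ gold) from by omega,
      show ¬((150 : Int) ≤ gold) from by omega]
    omega
  rcases lt_or_ge gold 120 with h3 | h3
  · simp [pvBestA, List.filter, PySem.List.max?,
      show (30 : Int) ≤ gold from by omega,
      show (60 : Int) ≤ gold from by omega,
      show (90 : Int) ≤ gold from by omega,
      show ¬((120 : Int) ≤ gold) from by omega,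
      show ¬((150 : Int) ≤ gold) from by omega]
    omega
  rcases lt_or_ge gold 150 with h4 | h4
  · simp [pvBestA, List.filter, PySem.List.max?,
      show (30 : Int) ≤ gold from by omega,
      show (60 : Int) ≤ gold from by omega,
      show (90 : Int) ≤ gold from by omega,
      show (120 : Int) ≤ gold from by omega,
      show ¬((150 : Int) ≤ gold) from by omega]
    omega
  simp [pvBestA, List.filter, PySem.List.max?,
      show (30 : Int) ≤ gold from by omega,
      show (60 : Int) ≤ gold from by omega,
      show (90 : Int) ≤ gold from by omega,
      show (120 : Int) ≤ gold from by omega,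
      show (150 : Int) ≤ gold from by omega]
  omega

lemma pvBestA_boots (gold : Int) (h : (30:Int) ≤ gold) :
    pvBestA [(3, 24), (6, 48), (9, 72), (12, 96), (15, 120)] gold = some (3 * min (PySem.Int.floordiv gold 24) 5) := by
  rw [PySem.Int.floordiv_eq_ediv_of_pos (by norm_num)]
  rcases lt_or_ge gold 48 with h1 | h1
  · simp [pvBestA, List.filter, PySem.List.max?,
      show (24 : Int) ≤ gold from by omega,
      show ¬((48 : Int) ≤ gold) from by omega,
      show ¬((72 : Int) ≤ gold) from by omega,
      show ¬((96 : Int) ≤ gold) from by omega,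
      show ¬((120 : Int) ≤ gold) from by omega]
    omega
  rcases lt_or_ge gold 72 with h2 | h2
  · simp [pvBestA, List.filter, PySem.List.max?,
      show (24 : Int) ≤ gold from by omega,
      show (48 : Int) ≤ gold from by omega,
      show ¬((72 : Int) ≤ gold) from by omega,
      show ¬((96 : Int) ≤ gold) from by omega,
      show ¬((120 : Int) ≤ gold) from by omega]
    omega
  rcases lt_or_ge gold 96 with h3 | h3
  · simp [pvBestA, List.filter, PySem.List.max?,
      show (24 : Int) ≤ gold from by omega,
      show (48 : Int) ≤ gold from by omega,
      show (72 : Int) ≤ gold from by omega,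
      show ¬((96 : Int) ≤ gold) from by omega,
      show ¬((120 : Int) ≤ gold) from by omega]
    omega
  rcases lt_or_ge gold 120 with h4 | h4
  · simp [pvBestA, List.filter, PySem.List.max?,
      show (24 : Int) ≤ gold from by omega,
      show (48 : Int) ≤ gold from by omega,
      show (72 : Int) ≤ gold from by omega,
      show (96 : Int) ≤ gold from by omega,
      show ¬((120 : Int) ≤ gold) from by omega]
    omega
  simp [pvBestA, List.filter, PySem.List.max?,
      show (24 : Int) ≤ gold from by omega,
      show (48 : Int) ≤ gold from by omega,
      show (72 : Int) ≤ gold from by omega,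
      show (96 : Int) ≤ gold from by omega,
      show (120 : Int) ≤ gold from by omega]
  omega

-- ===== VERDICT (by name: the statement is the Claim_ definition above) =====
theorem max_stats_spec : Claim_equal_max_stats := by
  intro character gold _ hpre
  obtain ⟨hc, hg⟩ := hpre
  unfold Spec_max_stats
  rcases hc with rfl | rfl | rfl | rfl | rfl <;>
    simp [max_stats, max_stats_alt, pvBestA_weapons gold hg, pvBestA_armor gold hg,
      pvBestA_boots gold hg, PySem.List.pyGetD,
      show pvCharactersTable.get? "Knight" = some [120, 140, 6] from by decide,
      show pvCharactersTable.get? "Warrior" = some [180, 71, 8] from by decide,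
      show pvCharactersTable.get? "Fairy" = some [71, 100, 16] from by decide,
      show pvCharactersTable.get? "Robot" = some [160, 120, 11] from by decide,
      show pvCharactersTable.get? "Giant" = some [160, 200, 4] from by decide]
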